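-- pv_equiv track=rewrite | github.com/MattFisher/hangman-bench | analysis/measure_difficulty.py | best_move_coverage
-- ===== SOURCE A (Python) =====
-- from typing import Dict, List, Optional, Sequence, Tuple
--
-- ALPHABET = [chr(c) for c in range(ord("a"), ord("z") + 1)]
--
-- def best_move_coverage(
--     board: str, wrong_guesses: List[str], dictionary: List[str]
-- ) -> Optional[str]:
--     letters_already_found = {c for c in board if c != "."}
--     excluded = letters_already_found.union(wrong_guesses)
--     counts: Dict[str, int] = {c: 0 for c in ALPHABET if c not in excluded}
--     if not counts:
--         return None
--     for word in dictionary: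
--         s = set(word)
--         for ch in s:
--             if ch in counts:
--                 counts[ch] += 1
--     max_count = max(counts.values(), default=0)
--     if max_count <= 0:
--         return None
--     # Argmax with alphabetical tie-break
--     return min([ch for ch, cnt in counts.items() if cnt == max_count])
-- ===== SOURCE B (Python) =====
-- from typing import List, Optional
--
-- ALPHABET = [chr(c) for c in range(ord("a"), ord("z") + 1)]
--
-- def best_move_coverage(
--     board: str, wrong_guesses: List[str], dictionary: List[str]
-- ) -> Optional[str]:
--     excluded = {c for c in board if c != "."} | set(wrong_guesses)
--     candidates = [c for c in ALPHABET if c not in excluded]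
--     if not candidates:
--         return None
--
--     def cover(letter: str) -> int:
--         return sum(1 for w in dictionary if letter in w)
--
--     best = max(candidates, key=cover)  # first (alphabetically smallest) maximizer
--     if cover(best) <= 0:
--         return None
--     return best
-- ===== Notes on version B (the rewrite author's own statement) =====
-- stated objective: simpler
-- what changed: Replaced A's mutable counts dict (one pass over the dictionary incrementing every distinct letter of each word, then max over values and min over the argmax keys) by a direct max(candidates, key=cover) over the alphabetically ordered candidate list, where cover(letter) scans the dictionary counting words containing the letter; max's first-maximizer rule gives the alphabetical tie-break for free.
import Mathlib
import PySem

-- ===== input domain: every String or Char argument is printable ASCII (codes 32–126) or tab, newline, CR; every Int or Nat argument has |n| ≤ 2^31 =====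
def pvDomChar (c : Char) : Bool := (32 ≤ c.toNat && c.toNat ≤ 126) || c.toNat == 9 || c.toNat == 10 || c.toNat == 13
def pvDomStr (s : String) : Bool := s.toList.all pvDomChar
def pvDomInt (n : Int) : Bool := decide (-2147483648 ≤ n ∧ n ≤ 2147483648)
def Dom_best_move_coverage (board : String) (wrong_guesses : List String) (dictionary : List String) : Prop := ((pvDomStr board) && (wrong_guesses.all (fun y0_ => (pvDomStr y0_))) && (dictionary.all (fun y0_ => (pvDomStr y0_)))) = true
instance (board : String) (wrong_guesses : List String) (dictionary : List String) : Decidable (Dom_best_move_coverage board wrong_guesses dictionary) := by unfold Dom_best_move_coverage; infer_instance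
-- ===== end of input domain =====

-- B replaces A's single-pass mutable counts dict by a per-letter dictionary scan with
-- max(candidates, key=cover) over the alphabetically ordered candidates (simpler; not faster).

-- ===== PORT A =====
-- module constant: ALPHABET = [chr(c) for c in range(ord("a"), ord("z") + 1)]
def pvALPHABET : List String :=
  (PySem.List.pyRange 97 123 1).map (fun c => String.ofList [Char.ofNat c.toNat])

def best_move_coverage (board : String) (wrong_guesses : List String) (dictionary : List String) : Option String :=
  let letters_already_found : PySem.Set String :=
    PySem.Set.ofList ((board.toList.filter (fun c => c ≠ '.')).map (fun c => String.ofList [c]))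
  let excluded : PySem.Set String := PySem.Set.union letters_already_found wrong_guesses
  let counts : PySem.Dict String Int :=
    pvALPHABET.foldl (fun d c => if PySem.Set.contains excluded c then d else d.insert c 0) PySem.Dict.empty
  if counts.items.isEmpty then none
  else
    let counts2 : PySem.Dict String Int :=
      dictionary.foldl (fun d word =>
        (PySem.Set.ofList (word.toList.map (fun ch => String.ofList [ch]))).foldl
          (fun d2 ch => if d2.contains ch then PySem.Dict.modify d2 ch 0 (fun v => v + 1) else d2) d) counts
    let max_count : Int := (PySem.List.max? counts2.values (fun v => v)).getD 0
    if max_count ≤ 0 then none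
    else PySem.List.min? ((counts2.items.filter (fun p => decide (p.2 = max_count))).map (fun p => p.1)) (fun c => c)

-- ===== PORT B =====
-- cover(letter) = sum(1 for w in dictionary if letter in w)
def pvCover (dictionary : List String) (letter : String) : Int :=
  dictionary.foldl (fun acc w => if PySem.Str.isIn letter w then acc + 1 else acc) 0

def best_move_coverage_alt (board : String) (wrong_guesses : List String) (dictionary : List String) : Option String :=
  let excluded : PySem.Set String :=
    PySem.Set.union (PySem.Set.ofList ((board.toList.filter (fun c => c ≠ '.')).map (fun c => String.ofList [c]))) wrong_guesses
  let candidates : List String := pvALPHABET.filter (fun c => !(PySem.Set.contains excluded c))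
  match PySem.List.max? candidates (fun c => pvCover dictionary c) with
  | none => none
  | some best => if pvCover dictionary best ≤ 0 then none else some best

-- ===== PRECONDITION & SPEC =====
def Spec_best_move_coverage (board : String) (wrong_guesses : List String) (dictionary : List String) (out : Option String) : Prop := out = best_move_coverage_alt board wrong_guesses dictionary
instance (board : String) (wrong_guesses : List String) (dictionary : List String) (out : Option String) : Decidable (Spec_best_move_coverage board wrong_guesses dictionary out) := by unfold Spec_best_move_coverage; infer_instance

-- ===== CLAIM (what is proved, stated in full; the proofs are below) =====
def Claim_equal_best_move_coverage : Prop := ∀ (board : String) (wrong_guesses : List String) (dictionary : List String), Dom_best_move_coverage board wrong_guesses dictionary → Spec_best_move_coverage board wrong_guesses dictionary (best_move_coverage board wrong_guesses dictionary)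

-- ===== LEMMAS AND PROOFS =====

-- The candidate letters are strictly increasing (hence nodup) single-character strings.
theorem pvALPHABET_pairwise : pvALPHABET.Pairwise (· < ·) := by
  have h : pvALPHABET.Pairwise (fun a b => a.toList < b.toList) := by decide
  exact h.imp (fun h => String.lt_iff_toList_lt.mpr h)

theorem pvALPHABET_nodup : pvALPHABET.Nodup := by decide

set_option maxRecDepth 4096 in
theorem pvALPHABET_singletons : ∀ c ∈ pvALPHABET, ∃ γ : Char, c = String.ofList [γ] := by
  intro c hc
  rcases List.mem_map.mp hc with ⟨n, _, rfl⟩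
  exact ⟨_, rfl⟩

-- dict ⟨l.map (c, g c)⟩ : contains, get?, insert
theorem mapDict_contains (l : List String) (g : String → Int) (k : String) :
    (PySem.Dict.mk (l.map (fun c => (c, g c))) : PySem.Dict String Int).contains k = decide (k ∈ l) := by
  induction l with
  | nil => simp [PySem.Dict.contains]
  | cons x t ih =>
    simp only [PySem.Dict.contains, List.map_cons, List.any_cons] at ih ⊢
    rw [ih]
    by_cases hx : x = k
    · subst hx; simp
    · simp [hx, Ne.symm hx]

theorem mapDict_get? (l : List String) (g : String → Int) (k : String)
    (hk : k ∈ l) :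
    (PySem.Dict.mk (l.map (fun c => (c, g c))) : PySem.Dict String Int).get? k = some (g k) := by
  induction l with
  | nil => simp at hk
  | cons x t ih =>
    by_cases hx : x = k
    · subst hx; simp [PySem.Dict.get?]
    · have hk' : k ∈ t := by
        rcases List.mem_cons.mp hk with h | h
        · exact absurd h.symm hx
        · exact h
      unfold PySem.Dict.get? at ih ⊢
      simp only [List.map_cons]
      rw [List.find?_cons_of_neg]
      · exact ih hk'
      · simp [hx]

theorem mapDict_insert (l : List String) (g : String → Int) (k : String) (v : Int)
    (hk : k ∈ l) :
    (PySem.Dict.mk (l.map (fun c => (c, g c))) : PySem.Dict String Int).insert k v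
      = PySem.Dict.mk (l.map (fun c => (c, if c = k then v else g c))) := by
  have hc : (PySem.Dict.mk (l.map (fun c => (c, g c))) : PySem.Dict String Int).contains k = true := by
    rw [mapDict_contains]; simp [hk]
  simp only [PySem.Dict.insert, hc, if_pos]
  congr 1
  simp only [List.map_map]
  apply List.map_congr_left
  intro a _
  by_cases ha : a = k <;> simp [ha]

-- building the counts dict: fresh keys append in order
theorem buildDict (l : List String) (ps : List (String × Int))
    (hdisj : ∀ c ∈ l, c ∉ ps.map Prod.fst) (hnd : l.Nodup) :
    (l.foldl (fun d c => d.insert c 0) (PySem.Dict.mk ps : PySem.Dict String Int)).items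
      = ps ++ l.map (fun c => (c, (0:Int))) := by
  induction l generalizing ps with
  | nil => simp
  | cons x t ih =>
    have hxps : x ∉ ps.map Prod.fst := hdisj x (by simp)
    have hx : (PySem.Dict.mk ps : PySem.Dict String Int).contains x = false := by
      simp only [PySem.Dict.contains, List.any_eq_false]
      intro p hp h
      exact hxps (List.mem_map.mpr ⟨p, hp, by simpa using h⟩)
    have hstep : (PySem.Dict.mk ps : PySem.Dict String Int).insert x 0 = PySem.Dict.mk (ps ++ [(x, 0)]) := by
      simp [PySem.Dict.insert, hx]
    have hdisj' : ∀ c ∈ t, c ∉ (ps ++ [(x, 0)]).map Prod.fst := by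
      intro c hc hmem
      simp only [List.map_append] at hmem
      rcases List.mem_append.mp hmem with h | h
      · exact hdisj c (List.mem_cons_of_mem _ hc) h
      · simp only [List.map_cons, List.map_nil, List.mem_singleton] at h
        exact (List.nodup_cons.mp hnd).1 (h ▸ hc)
    simp only [List.foldl_cons, hstep]
    rw [ih (ps ++ [(x, 0)]) hdisj' (List.nodup_cons.mp hnd).2]
    simp

-- one word's inner loop adds the membership indicator to every candidate's count
theorem innerFold (l : List String) (s : List String) (hs : s.Nodup) :
    ∀ g : String → Int,
    (s.foldl (fun d2 ch => if d2.contains ch then PySem.Dict.modify d2 ch 0 (fun v => v + 1) else d2)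
        (PySem.Dict.mk (l.map (fun c => (c, g c)))))
      = PySem.Dict.mk (l.map (fun c => (c, g c + (if c ∈ s then 1 else 0)))) := by
  induction s with
  | nil => intro g; simp
  | cons ch s' ih =>
    intro g
    have hch : ch ∉ s' := (List.nodup_cons.mp hs).1
    have hs' : s'.Nodup := (List.nodup_cons.mp hs).2
    by_cases hmem : ch ∈ l
    · have hc : (PySem.Dict.mk (l.map (fun c => (c, g c))) : PySem.Dict String Int).contains ch = true := by
        rw [mapDict_contains]; simp [hmem]
      have hmod : PySem.Dict.modify (PySem.Dict.mk (l.map (fun c => (c, g c)))) ch 0 (fun v => v + 1)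
          = PySem.Dict.mk (l.map (fun c => (c, if c = ch then g ch + 1 else g c))) := by
        simp only [PySem.Dict.modify, PySem.Dict.getD, mapDict_get? l g ch hmem]
        simpa using mapDict_insert l g ch (g ch + 1) hmem
      rw [List.foldl_cons, hc]
      simp only [if_pos]
      rw [hmod, ih hs' (fun c => if c = ch then g ch + 1 else g c)]
      have hpt : ∀ a ∈ l, ((fun c => (c, (if c = ch then g ch + 1 else g c) + if c ∈ s' then (1:Int) else 0)) a)
          = ((fun c => (c, g c + if c ∈ ch :: s' then (1:Int) else 0)) a) := by
        intro a _
        by_cases ha : a = ch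
        · subst ha; simp [hch]
        · simp [ha]
      exact congrArg PySem.Dict.mk (List.map_congr_left hpt)
    · have hc : (PySem.Dict.mk (l.map (fun c => (c, g c))) : PySem.Dict String Int).contains ch = false := by
        rw [mapDict_contains]; simp [hmem]
      rw [List.foldl_cons, hc]
      simp only [Bool.false_eq_true, if_false]
      rw [ih hs' g]
      have hpt : ∀ a ∈ l, ((fun c => (c, g c + if c ∈ s' then (1:Int) else 0)) a)
          = ((fun c => (c, g c + if c ∈ ch :: s' then (1:Int) else 0)) a) := by
        intro a hal
        have hne : a ≠ ch := fun h => hmem (h ▸ hal)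
        simp [List.mem_cons, hne]
      exact congrArg PySem.Dict.mk (List.map_congr_left hpt)

-- the whole dictionary loop: each candidate's count is the fold of per-word indicators
theorem outerFold (l : List String) (dictionary : List String) :
    ∀ g : String → Int,
    (dictionary.foldl (fun d word =>
        (PySem.Set.ofList (word.toList.map (fun ch => String.ofList [ch]))).foldl
          (fun d2 ch => if d2.contains ch then PySem.Dict.modify d2 ch 0 (fun v => v + 1) else d2) d)
        (PySem.Dict.mk (l.map (fun c => (c, g c)))))
      = PySem.Dict.mk (l.map (fun c => (c,
          dictionary.foldl (fun a w => a + (if c ∈ PySem.Set.ofList (w.toList.map (fun ch => String.ofList [ch])) then 1 else 0)) (g c)))) := by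
  induction dictionary with
  | nil => intro g; simp
  | cons w ws ih =>
    intro g
    simp only [List.foldl_cons]
    rw [innerFold l _ (PySem.Set.nodup_ofList _) g]
    exact ih _

-- membership of a 1-char string in a word's letter set  =  '<letter> in word'
theorem indicator_eq (γ : Char) (w : String) :
    (String.ofList [γ] ∈ PySem.Set.ofList (w.toList.map (fun ch => String.ofList [ch])))
      ↔ PySem.Str.isIn (String.ofList [γ]) w = true := by
  rw [PySem.Str.isIn_iff_infix, PySem.Set.mem_ofList]
  simp only [String.toList_ofList]
  constructor
  · intro h
    rcases List.mem_map.mp h with ⟨ch, hch, he⟩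
    have hγ : γ = ch := by
      have h2 := congrArg String.toList he
      simpa using h2.symm
    rcases List.append_of_mem (hγ ▸ hch) with ⟨s, t, ht⟩
    exact ⟨s, t, by simp [ht]⟩
  · intro h
    have hγ : γ ∈ w.toList := (List.singleton_sublist).mp h.sublist
    exact List.mem_map.mpr ⟨γ, hγ, rfl⟩

-- A's per-letter count equals B's cover(letter), for alphabet letters
theorem fold_indicator (γ : Char) (ws : List String) :
    ∀ i : Int,
    ws.foldl (fun a w => a + (if String.ofList [γ] ∈ PySem.Set.ofList (w.toList.map (fun ch => String.ofList [ch])) then 1 else 0)) i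
      = ws.foldl (fun acc w => if PySem.Str.isIn (String.ofList [γ]) w then acc + 1 else acc) i := by
  induction ws with
  | nil => intro i; rfl
  | cons w ws ih =>
    intro i
    simp only [List.foldl_cons]
    have hstep : (i + if String.ofList [γ] ∈ PySem.Set.ofList (w.toList.map (fun ch => String.ofList [ch])) then (1:Int) else 0)
        = (if PySem.Str.isIn (String.ofList [γ]) w then i + 1 else i) := by
      by_cases hm : String.ofList [γ] ∈ PySem.Set.ofList (w.toList.map (fun ch => String.ofList [ch]))
      · rw [if_pos hm, if_pos ((indicator_eq γ w).mp hm)]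
      · rw [if_neg hm, if_neg (fun h => hm ((indicator_eq γ w).mpr h))]
        exact add_zero i
    rw [hstep]
    exact ih _

theorem count_eq_cover (dictionary : List String) (c : String) (hc : c ∈ pvALPHABET) :
    dictionary.foldl (fun a w => a + (if c ∈ PySem.Set.ofList (w.toList.map (fun ch => String.ofList [ch])) then 1 else 0)) 0
      = pvCover dictionary c := by
  rcases pvALPHABET_singletons c hc with ⟨γ, rfl⟩
  exact fold_indicator γ dictionary 0

-- foldl forms of PySem.List.max? / min? (same step function, named)
def pvMaxStep {α : Type} (f : α → Int) : Option α → α → Option α :=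
  fun acc x => match acc with
    | none => some x
    | some m => if f m < f x then some x else some m

def pvMinStep (f : String → String) : Option String → String → Option String :=
  fun acc y => match acc with
    | none => some y
    | some m => if f y < f m then some y else some m

theorem max?_eq_foldl {α : Type} (xs : List α) (f : α → Int) :
    PySem.List.max? xs f = List.foldl (pvMaxStep f) none xs := rfl

theorem min?_eq_foldl (xs : List String) (f : String → String) :
    PySem.List.min? xs f = List.foldl (pvMinStep f) none xs := by
  unfold PySem.List.min? pvMinStep
  congr 1
  funext acc y
  cases acc <;> rfl

-- max over mapped values vs max-by-key
theorem max?_map_id_aux {α : Type} (f : α → Int) (l : List α) :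
    ∀ acc : Option α,
    List.foldl (pvMaxStep (fun v => v)) (acc.map f) (l.map f)
      = (List.foldl (pvMaxStep f) acc l).map f := by
  induction l with
  | nil => intro acc; rfl
  | cons x t ih =>
    intro acc
    cases acc with
    | none => simpa [pvMaxStep] using ih (some x)
    | some m =>
      simp only [List.map_cons, List.foldl_cons, Option.map_some, pvMaxStep]
      by_cases hlt : f m < f x
      · simpa [hlt] using ih (some x)
      · simpa [hlt] using ih (some m)

theorem max?_map_id {α : Type} (l : List α) (f : α → Int) :
    PySem.List.max? (l.map f) (fun v => v) = (PySem.List.max? l f).map f := by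
  rw [max?_eq_foldl, max?_eq_foldl]
  simpa using max?_map_id_aux f l none

theorem max?_congr_aux {α : Type} (f f' : α → Int) (l : List α) :
    ∀ acc : Option α, (∀ c ∈ l, f c = f' c) →
      (∀ m, acc = some m → f m = f' m) →
      List.foldl (pvMaxStep f) acc l = List.foldl (pvMaxStep f') acc l := by
  induction l with
  | nil => intro acc _ _; rfl
  | cons x t ih =>
    intro acc hall hacc
    have hx : f x = f' x := hall x (by simp)
    have hall' : ∀ c ∈ t, f c = f' c := fun c hc => hall c (by simp [hc])
    cases acc with
    | none =>
      simp only [List.foldl_cons, pvMaxStep]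
      exact ih (some x) hall' (fun m hm => by cases hm; exact hx)
    | some m =>
      have hm : f m = f' m := hacc m rfl
      simp only [List.foldl_cons, pvMaxStep, hm, hx]
      by_cases hlt : f' m < f' x
      · simp only [hlt, if_pos]
        exact ih (some x) hall' (fun m' hm' => by cases hm'; exact hx)
      · simp only [hlt, if_false]
        exact ih (some m) hall' (fun m' hm' => by cases hm'; exact hm)

theorem max?_congr {α : Type} (l : List α) (f f' : α → Int) (h : ∀ c ∈ l, f c = f' c) :
    PySem.List.max? l f = PySem.List.max? l f' := by
  rw [max?_eq_foldl, max?_eq_foldl]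
  exact max?_congr_aux f f' l none h (fun m hm => by cases hm)

-- the running max's key only grows
theorem max_mono (f : String → Int) (l : List String) :
    ∀ (m b : String), List.foldl (pvMaxStep f) (some m) l = some b → f m ≤ f b := by
  induction l with
  | nil => intro m b h; cases h; exact le_refl _
  | cons x t ih =>
    intro m b h
    simp only [List.foldl_cons, pvMaxStep] at h
    by_cases hlt : f m < f x
    · rw [if_pos hlt] at h
      exact le_of_lt (lt_of_lt_of_le hlt (ih x b h))
    · rw [if_neg hlt] at h
      exact ih m b h

-- max? returns the FIRST maximizer: filtering on the max value, it is the head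
theorem max?_first_aux (f : String → Int) (l : List String) :
    ∀ (m b : String), List.foldl (pvMaxStep f) (some m) l = some b →
    ((m :: l).filter (fun c => decide (f c = f b))).head? = some b := by
  induction l with
  | nil =>
    intro m b h
    cases h
    simp
  | cons x t ih =>
    intro m b h
    simp only [List.foldl_cons, pvMaxStep] at h
    by_cases hlt : f m < f x
    · rw [if_pos hlt] at h
      have hxb : f x ≤ f b := max_mono f t x b h
      have hmb : f m ≠ f b := ne_of_lt (lt_of_lt_of_le hlt hxb)
      have := ih x b h
      simpa [hmb] using this
    · rw [if_neg hlt] at h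
      have hmb' : f m ≤ f b := max_mono f t m b h
      by_cases hm : f m = f b
      · have := ih m b h
        have hb : b = m := by
          simp only [List.filter_cons, hm, decide_true, if_pos] at this
          have h2 : m = b := by simpa using this
          exact h2.symm
        subst hb
        simp
      · have hxm : f x ≤ f m := not_lt.mp hlt
        have hxb : f x ≠ f b := by
          intro he
          exact hm (le_antisymm hmb' (he ▸ hxm))
        have := ih m b h
        simp only [List.filter_cons, hm, decide_false, Bool.false_eq_true, if_false] at this ⊢
        simpa [hxb] using this

theorem max?_first (l : List String) (f : String → Int) (b : String)
    (h : PySem.List.max? l f = some b) :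
    (l.filter (fun c => decide (f c = f b))).head? = some b := by
  cases l with
  | nil => simp [PySem.List.max?] at h
  | cons m t =>
    rw [max?_eq_foldl, List.foldl_cons] at h
    exact max?_first_aux f t m b h

-- min? of a strictly increasing list is its head
theorem min?_stay (l : List String) :
    ∀ (x : String), (∀ y ∈ l, ¬ y < x) →
    List.foldl (pvMinStep (fun c => c)) (some x) l = some x := by
  induction l with
  | nil => intro x _; rfl
  | cons y t ih =>
    intro x hall
    simp only [List.foldl_cons, pvMinStep]
    rw [if_neg (hall y (by simp))]
    exact ih x (fun z hz => hall z (by simp [hz]))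

theorem min?_sorted (l : List String) (hl : l.Pairwise (· < ·)) :
    PySem.List.min? l (fun c => c) = l.head? := by
  cases l with
  | nil => rfl
  | cons x t =>
    rw [min?_eq_foldl, List.foldl_cons, List.head?_cons]
    exact min?_stay t x (fun y hy => asymm ((List.pairwise_cons.mp hl).1 y hy))

theorem dict_eq_items {ps : List (String × Int)} {d : PySem.Dict String Int}
    (h : d.items = ps) : d = PySem.Dict.mk ps := by
  cases d
  cases h
  rfl

theorem foldl_if_skip {α β : Type} (l : List α) (p : α → Bool) (f : β → α → β) :
    ∀ init : β, l.foldl (fun d c => if p c then d else f d c) init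
      = (l.filter (fun c => !p c)).foldl f init := by
  induction l with
  | nil => intro init; rfl
  | cons x t ih =>
    intro init
    cases hx : p x <;> simp [hx, ih]

-- ===== VERDICT (by name: the statement is the Claim_ definition above) =====
theorem best_move_coverage_spec : Claim_equal_best_move_coverage := by
  intro board wrong_guesses dictionary _
  unfold Spec_best_move_coverage
  simp only [best_move_coverage, best_move_coverage_alt]
  set ex : PySem.Set String := PySem.Set.union (PySem.Set.ofList ((board.toList.filter (fun c => c ≠ '.')).map (fun c => String.ofList [c]))) wrong_guesses with hex
  set cand : List String := pvALPHABET.filter (fun c => !(PySem.Set.contains ex c)) with hcand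
  have hnd : cand.Nodup := List.Nodup.filter _ pvALPHABET_nodup
  have hpw : cand.Pairwise (· < ·) := List.Pairwise.filter _ pvALPHABET_pairwise
  have hsub : ∀ c ∈ cand, c ∈ pvALPHABET := fun c hc => List.mem_of_mem_filter hc
  -- the dict comprehension builds the association list of candidates with count 0
  have hfold : pvALPHABET.foldl (fun (d : PySem.Dict String Int) c => if PySem.Set.contains ex c then d else d.insert c 0) PySem.Dict.empty
      = PySem.Dict.mk (cand.map (fun c => (c, (0:Int)))) := by
    have h1 := foldl_if_skip pvALPHABET (fun c => PySem.Set.contains ex c) (fun (d : PySem.Dict String Int) c => d.insert c 0) PySem.Dict.empty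
    beta_reduce at h1
    exact h1.trans (dict_eq_items (buildDict cand [] (by simp) hnd))
  rw [hfold]
  -- the counting loop
  set F0 : String → Int := fun c => dictionary.foldl (fun a w => a + (if c ∈ PySem.Set.ofList (w.toList.map (fun ch => String.ofList [ch])) then 1 else 0)) 0 with hF0
  have hcount : dictionary.foldl (fun d word =>
        (PySem.Set.ofList (word.toList.map (fun ch => String.ofList [ch]))).foldl
          (fun d2 ch => if d2.contains ch then PySem.Dict.modify d2 ch 0 (fun v => v + 1) else d2) d)
        (PySem.Dict.mk (cand.map (fun c => (c, (0:Int)))))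
      = PySem.Dict.mk (cand.map (fun c => (c, F0 c))) := by
    have h := outerFold cand dictionary (fun _ => (0:Int))
    beta_reduce at h
    exact h
  rw [hcount]
  have hcov : ∀ c ∈ cand, F0 c = pvCover dictionary c := fun c hc => count_eq_cover dictionary c (hsub c hc)
  by_cases hnil : cand = []
  · rw [hnil]
    simp [PySem.List.max?]
  · -- candidates nonempty: both sides pick the first maximizer
    have hne : (PySem.Dict.mk (cand.map (fun c => (c, (0:Int)))) : PySem.Dict String Int).items.isEmpty = false := by
      simp [hnil]
    rw [hne]
    simp only [Bool.false_eq_true, if_false]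
    have hvals : (PySem.Dict.mk (cand.map (fun c => (c, F0 c))) : PySem.Dict String Int).values = cand.map (fun c => F0 c) := by
      simp [PySem.Dict.values, List.map_map]
    rw [hvals]
    obtain ⟨b, hb⟩ : ∃ b, PySem.List.max? cand (fun c => F0 c) = some b := by
      cases h : PySem.List.max? cand (fun c => F0 c) with
      | none => exact absurd ((PySem.List.max?_eq_none_iff _ _).mp h) hnil
      | some b => exact ⟨b, rfl⟩
    have hmax : PySem.List.max? (cand.map (fun c => F0 c)) (fun v => v) = some (F0 b) := by
      rw [max?_map_id, hb]; rfl
    rw [hmax]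
    have hbmem : b ∈ cand := PySem.List.max?_mem hb
    have hBmax : PySem.List.max? cand (fun c => pvCover dictionary c) = some b := by
      rw [max?_congr cand (fun c => pvCover dictionary c) (fun c => F0 c) (fun c hc => (hcov c hc).symm)]
      exact hb
    rw [hBmax]
    have hcovb : pvCover dictionary b = F0 b := (hcov b hbmem).symm
    simp only [Option.getD_some, hcovb]
    by_cases hle : F0 b ≤ 0
    · rw [if_pos hle, if_pos hle]
    · rw [if_neg hle, if_neg hle]
      -- A's min over the argmax keys is the first maximizer b
      have hflt : ((cand.map (fun c => (c, F0 c))).filter (fun p => decide (p.2 = F0 b))).map (fun p => p.1)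
          = cand.filter (fun c => decide (F0 c = F0 b)) := by
        rw [List.filter_map, List.map_map]
        simp [Function.comp_def]
      have final : PySem.List.min? (((cand.map (fun c => (c, F0 c))).filter (fun p => decide (p.2 = F0 b))).map (fun p => p.1)) (fun c => c) = some b := by
        rw [hflt, min?_sorted _ (List.Pairwise.filter _ hpw)]
        exact max?_first cand (fun c => F0 c) b hb
      exact final
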